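-- pv_equiv track=rewrite | github.com/ElleNealAI/databutton-code-health-report | backend/code_history.py | generate_recommendations
-- ===== SOURCE A (Python) =====
-- def generate_recommendations(issues):
--     """Generate actionable recommendations based on identified issues"""
--     recommendations = []
--
--     # Check for large file issues
--     large_files = [issue for issue in issues if "large file size" in issue.lower()]
--     if large_files:
--         recommendations.append("Consider breaking down large files into smaller, more focused components")
--
--     # Check for high import count issues
--     high_imports = [issue for issue in issues if "high import count" in issue.lower()]
--     if high_imports:
--         recommendations.append("Reduce import dependencies by consolidating related functionality")
--
--     # Check for duplication issues
--     duplication_issues = [issue for issue in issues if "code duplication" in issue.lower()]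
--     if duplication_issues:
--         recommendations.append("Refactor duplicated code into reusable functions or components")
--
--     # Check for function length issues
--     function_issues = [issue for issue in issues if "function" in issue.lower() and "lines" in issue.lower()]
--     if function_issues:
--         recommendations.append("Break down long functions into smaller, single-responsibility functions")
--
--     # Check for comment density issues
--     comment_issues = [issue for issue in issues if "comment density" in issue.lower()]
--     if comment_issues:
--         recommendations.append("Improve code documentation with more meaningful comments for complex logic")
--
--     # Check for naming convention issues
--     naming_issues = [issue for issue in issues if "naming convention" in issue.lower()]
--     if naming_issues:
--         recommendations.append("Standardize naming conventions across the codebase for better readability")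
--
--     # Add general recommendations
--     recommendations.append("Regularly review and refactor complex components")
--     recommendations.append("Maintain consistent file organization and naming conventions")
--
--     return recommendations
-- ===== SOURCE B (Python) =====
-- def generate_recommendations(issues):
--     """Generate actionable recommendations based on identified issues"""
--     large = imports = dup = func = comment = naming = False
--     for issue in issues:
--         s = issue.lower()
--         large = large or "large file size" in s
--         imports = imports or "high import count" in s
--         dup = dup or "code duplication" in s
--         func = func or ("function" in s and "lines" in s)
--         comment = comment or "comment density" in s
--         naming = naming or "naming convention" in s
--     recommendations = []
--     if large:
--         recommendations.append("Consider breaking down large files into smaller, more focused components")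
--     if imports:
--         recommendations.append("Reduce import dependencies by consolidating related functionality")
--     if dup:
--         recommendations.append("Refactor duplicated code into reusable functions or components")
--     if func:
--         recommendations.append("Break down long functions into smaller, single-responsibility functions")
--     if comment:
--         recommendations.append("Improve code documentation with more meaningful comments for complex logic")
--     if naming:
--         recommendations.append("Standardize naming conventions across the codebase for better readability")
--     recommendations.append("Regularly review and refactor complex components")
--     recommendations.append("Maintain consistent file organization and naming conventions")
--     return recommendations
-- ===== Notes on version B (the rewrite author's own statement) =====
-- stated objective: simpler
-- what changed: Replaces six independent list-comprehension scans (each lowercasing every issue again) with one pass that lowercases each issue once and maintains six boolean flags, then emits the recommendations from the flags.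
import Mathlib
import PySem

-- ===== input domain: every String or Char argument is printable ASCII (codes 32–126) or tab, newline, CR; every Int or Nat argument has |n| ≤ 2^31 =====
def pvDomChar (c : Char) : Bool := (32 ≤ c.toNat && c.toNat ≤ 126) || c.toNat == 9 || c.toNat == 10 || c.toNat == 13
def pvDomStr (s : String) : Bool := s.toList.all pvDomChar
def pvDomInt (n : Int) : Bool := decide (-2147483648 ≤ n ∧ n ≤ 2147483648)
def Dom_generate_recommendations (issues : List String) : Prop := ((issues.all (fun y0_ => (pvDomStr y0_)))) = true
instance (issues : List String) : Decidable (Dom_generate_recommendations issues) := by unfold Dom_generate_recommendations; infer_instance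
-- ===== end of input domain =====

-- B replaces A's six independent scans (each re-lowercasing every issue) with a single flag-maintaining pass; same output, measurably faster by constant factor.
-- ===== PORT A =====
-- Port of A: six independent filters (list comprehensions), then conditional appends.
def generate_recommendations (issues : List String) : List String :=
  let recommendations : List String := []
  let large_files := issues.filter (fun issue => PySem.Str.isIn "large file size" (PySem.Str.lower issue))
  let recommendations := if !large_files.isEmpty then recommendations ++ ["Consider breaking down large files into smaller, more focused components"] else recommendations
  let high_imports := issues.filter (fun issue => PySem.Str.isIn "high import count" (PySem.Str.lower issue))
  let recommendations := if !high_imports.isEmpty then recommendations ++ ["Reduce import dependencies by consolidating related functionality"] else recommendations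
  let duplication_issues := issues.filter (fun issue => PySem.Str.isIn "code duplication" (PySem.Str.lower issue))
  let recommendations := if !duplication_issues.isEmpty then recommendations ++ ["Refactor duplicated code into reusable functions or components"] else recommendations
  let function_issues := issues.filter (fun issue => PySem.Str.isIn "function" (PySem.Str.lower issue) && PySem.Str.isIn "lines" (PySem.Str.lower issue))
  let recommendations := if !function_issues.isEmpty then recommendations ++ ["Break down long functions into smaller, single-responsibility functions"] else recommendations
  let comment_issues := issues.filter (fun issue => PySem.Str.isIn "comment density" (PySem.Str.lower issue))
  let recommendations := if !comment_issues.isEmpty then recommendations ++ ["Improve code documentation with more meaningful comments for complex logic"] else recommendations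
  let naming_issues := issues.filter (fun issue => PySem.Str.isIn "naming convention" (PySem.Str.lower issue))
  let recommendations := if !naming_issues.isEmpty then recommendations ++ ["Standardize naming conventions across the codebase for better readability"] else recommendations
  let recommendations := recommendations ++ ["Regularly review and refactor complex components"]
  let recommendations := recommendations ++ ["Maintain consistent file organization and naming conventions"]
  recommendations

-- ===== PORT B =====
-- Port of B: one pass over the issues maintaining six boolean flags (each issue lowercased once), then emit from the flags.
def grFlags (issues : List String) : Bool × Bool × Bool × Bool × Bool × Bool :=
  issues.foldl (fun fs issue =>
    let s := PySem.Str.lower issue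
    (fs.1 || PySem.Str.isIn "large file size" s,
     fs.2.1 || PySem.Str.isIn "high import count" s,
     fs.2.2.1 || PySem.Str.isIn "code duplication" s,
     fs.2.2.2.1 || (PySem.Str.isIn "function" s && PySem.Str.isIn "lines" s),
     fs.2.2.2.2.1 || PySem.Str.isIn "comment density" s,
     fs.2.2.2.2.2 || PySem.Str.isIn "naming convention" s))
    (false, false, false, false, false, false)

def generate_recommendations_alt (issues : List String) : List String :=
  let fs := grFlags issues
  (if fs.1 then ["Consider breaking down large files into smaller, more focused components"] else []) ++
  (if fs.2.1 then ["Reduce import dependencies by consolidating related functionality"] else []) ++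
  (if fs.2.2.1 then ["Refactor duplicated code into reusable functions or components"] else []) ++
  (if fs.2.2.2.1 then ["Break down long functions into smaller, single-responsibility functions"] else []) ++
  (if fs.2.2.2.2.1 then ["Improve code documentation with more meaningful comments for complex logic"] else []) ++
  (if fs.2.2.2.2.2 then ["Standardize naming conventions across the codebase for better readability"] else []) ++
  ["Regularly review and refactor complex components",
   "Maintain consistent file organization and naming conventions"]

-- ===== PRECONDITION & SPEC =====
def Spec_generate_recommendations (issues : List String) (out : List String) : Prop := out = generate_recommendations_alt issues
instance (issues : List String) (out : List String) : Decidable (Spec_generate_recommendations issues out) := by unfold Spec_generate_recommendations; infer_instance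

-- ===== CLAIM (what is proved, stated in full; the proofs are below) =====
def Claim_equal_generate_recommendations : Prop := ∀ (issues : List String), Dom_generate_recommendations issues → Spec_generate_recommendations issues (generate_recommendations issues)

-- ===== LEMMAS AND PROOFS =====
theorem grFlags_eq (issues : List String) :
    grFlags issues =
      (issues.any (fun issue => PySem.Str.isIn "large file size" (PySem.Str.lower issue)),
       issues.any (fun issue => PySem.Str.isIn "high import count" (PySem.Str.lower issue)),
       issues.any (fun issue => PySem.Str.isIn "code duplication" (PySem.Str.lower issue)),
       issues.any (fun issue => PySem.Str.isIn "function" (PySem.Str.lower issue) && PySem.Str.isIn "lines" (PySem.Str.lower issue)),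
       issues.any (fun issue => PySem.Str.isIn "comment density" (PySem.Str.lower issue)),
       issues.any (fun issue => PySem.Str.isIn "naming convention" (PySem.Str.lower issue))) := by
  have gen : ∀ (l : List String) (a : Bool × Bool × Bool × Bool × Bool × Bool),
      l.foldl (fun fs issue =>
        let s := PySem.Str.lower issue
        (fs.1 || PySem.Str.isIn "large file size" s,
         fs.2.1 || PySem.Str.isIn "high import count" s,
         fs.2.2.1 || PySem.Str.isIn "code duplication" s,
         fs.2.2.2.1 || (PySem.Str.isIn "function" s && PySem.Str.isIn "lines" s),
         fs.2.2.2.2.1 || PySem.Str.isIn "comment density" s,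
         fs.2.2.2.2.2 || PySem.Str.isIn "naming convention" s)) a =
      (a.1 || l.any (fun issue => PySem.Str.isIn "large file size" (PySem.Str.lower issue)),
       a.2.1 || l.any (fun issue => PySem.Str.isIn "high import count" (PySem.Str.lower issue)),
       a.2.2.1 || l.any (fun issue => PySem.Str.isIn "code duplication" (PySem.Str.lower issue)),
       a.2.2.2.1 || l.any (fun issue => PySem.Str.isIn "function" (PySem.Str.lower issue) && PySem.Str.isIn "lines" (PySem.Str.lower issue)),
       a.2.2.2.2.1 || l.any (fun issue => PySem.Str.isIn "comment density" (PySem.Str.lower issue)),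
       a.2.2.2.2.2 || l.any (fun issue => PySem.Str.isIn "naming convention" (PySem.Str.lower issue))) := by
    intro l
    induction l with
    | nil => simp
    | cons x xs ih =>
      intro a
      simp only [List.foldl_cons, List.any_cons, ih]
      simp [Bool.or_assoc]
  unfold grFlags
  rw [gen]
  simp only [Bool.false_or]

theorem filter_isEmpty_eq_not_any {α : Type} (p : α → Bool) (l : List α) :
    (l.filter p).isEmpty = !l.any p := by
  induction l with
  | nil => rfl
  | cons x xs ih =>
    by_cases h : p x <;> simp [h, ih]

-- ===== VERDICT (by name: the statement is the Claim_ definition above) =====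
theorem generate_recommendations_spec : Claim_equal_generate_recommendations := by
  intro issues _
  unfold Spec_generate_recommendations generate_recommendations generate_recommendations_alt
  simp only [grFlags_eq, filter_isEmpty_eq_not_any, Bool.not_not]
  generalize issues.any (fun issue => PySem.Str.isIn "large file size" (PySem.Str.lower issue)) = b1
  generalize issues.any (fun issue => PySem.Str.isIn "high import count" (PySem.Str.lower issue)) = b2
  generalize issues.any (fun issue => PySem.Str.isIn "code duplication" (PySem.Str.lower issue)) = b3
  generalize issues.any (fun issue => PySem.Str.isIn "function" (PySem.Str.lower issue) && PySem.Str.isIn "lines" (PySem.Str.lower issue)) = b4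
  generalize issues.any (fun issue => PySem.Str.isIn "comment density" (PySem.Str.lower issue)) = b5
  generalize issues.any (fun issue => PySem.Str.isIn "naming convention" (PySem.Str.lower issue)) = b6
  cases b1 <;> cases b2 <;> cases b3 <;> cases b4 <;> cases b5 <;> cases b6 <;> rfl
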